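-- pv_equiv track=rewrite | github.com/nicolegrimaldos/CS303E | MyStringFunctions.py | myRemove
-- ===== SOURCE A (Python) =====
-- def myRemove(str, ch):
--     # Return a new string with the first occurrence of ch
--     # removed.  If there is none, return str.
--     new_string = ""
--     found = "No"
--     for x in str:
--         if x != ch or found == "Yes":
--             new_string += x
--         elif x == ch and found == "No":
--             found = "Yes"
--     if found == "Yes":
--         return new_string
--     else:
--         return str
-- ===== SOURCE B (Python) =====
-- def myRemove(str, ch):
--     # Splice out the first occurrence with find + slices.
--     # A only ever matches a single character, so a multi-char or empty ch
--     # is never removed: guard with len(ch) == 1.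
--     if len(ch) != 1:
--         return str
--     idx = str.find(ch)
--     if idx == -1:
--         return str
--     return str[:idx] + str[idx+1:]
-- ===== Notes on version B (the rewrite author's own statement) =====
-- stated objective: faster
-- what changed: replaces the char-by-char accumulation loop with string state flags by a single find() plus a two-slice splice (guarded by len(ch)==1, since A's per-character comparison only ever matches single characters)
import Mathlib
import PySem

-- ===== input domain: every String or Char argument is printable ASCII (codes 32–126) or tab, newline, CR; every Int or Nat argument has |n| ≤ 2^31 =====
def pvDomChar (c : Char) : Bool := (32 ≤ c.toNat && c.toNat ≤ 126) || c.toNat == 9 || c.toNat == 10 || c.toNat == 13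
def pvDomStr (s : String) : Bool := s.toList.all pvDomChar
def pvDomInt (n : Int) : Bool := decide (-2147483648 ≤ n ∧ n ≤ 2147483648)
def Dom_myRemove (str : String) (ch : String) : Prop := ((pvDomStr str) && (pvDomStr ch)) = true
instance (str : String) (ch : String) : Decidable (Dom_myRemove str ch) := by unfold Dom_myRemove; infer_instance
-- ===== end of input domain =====

-- B replaces A's char-by-char accumulation loop by find + a two-slice splice (len(ch)==1 guard).

-- ===== PORT A =====
-- loop body of A: x is a one-character string, so 'x != ch' is '[x] ≠ ch.toList'
def pvStepA (cl : List Char) (acc : List Char × String) (x : Char) : List Char × String :=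
  if [x] ≠ cl ∨ acc.2 = "Yes" then (acc.1 ++ [x], acc.2)
  else if [x] = cl ∧ acc.2 = "No" then (acc.1, "Yes")
  else acc

def myRemove (str : String) (ch : String) : String :=
  let p := str.toList.foldl (pvStepA ch.toList) ([], "No")
  if p.2 = "Yes" then String.ofList p.1 else str

-- ===== PORT B =====
def myRemove_alt (str : String) (ch : String) : String :=
  if PySem.Str.len ch ≠ 1 then str
  else
    let idx := PySem.Str.find str ch
    if idx = -1 then str
    else
      -- str[:idx] + str[idx+1:]
      String.ofList (PySem.List.slice str.toList none (some idx) ++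
                 PySem.List.slice str.toList (some (idx + 1)) none)

-- ===== PRECONDITION & SPEC =====
def Spec_myRemove (str : String) (ch : String) (out : String) : Prop := out = myRemove_alt str ch
instance (str : String) (ch : String) (out : String) : Decidable (Spec_myRemove str ch out) := by unfold Spec_myRemove; infer_instance

-- ===== CLAIM (what is proved, stated in full; the proofs are below) =====
def Claim_equal_myRemove : Prop := ∀ (str : String) (ch : String), Dom_myRemove str ch → Spec_myRemove str ch (myRemove str ch)

-- ===== LEMMAS AND PROOFS =====

-- once found = "Yes", A's loop just appends every remaining character
lemma foldA_yes (cl : List Char) (l : List Char) (acc : List Char) :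
    l.foldl (pvStepA cl) (acc, "Yes") = (acc ++ l, "Yes") := by
  induction l generalizing acc with
  | nil => simp
  | cons x t ih => simp [pvStepA, ih]

-- with a ch of length ≠ 1 the match never fires: A's loop copies str
lemma foldA_ne (cl : List Char) (h : cl.length ≠ 1) (l : List Char) (acc : List Char) :
    l.foldl (pvStepA cl) (acc, "No") = (acc ++ l, "No") := by
  induction l generalizing acc with
  | nil => simp
  | cons x t ih =>
      have hx : [x] ≠ cl := by intro he; rw [← he] at h; simp at h
      simp [pvStepA, hx, ih]

-- single-character case: A's loop removes the first occurrence of c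
lemma foldA_no (c : Char) (l : List Char) (acc : List Char) :
    l.foldl (pvStepA [c]) (acc, "No") =
      if c ∈ l then
        (acc ++ l.take (l.findIdx (· = c)) ++ l.drop (l.findIdx (· = c) + 1), "Yes")
      else (acc ++ l, "No") := by
  induction l generalizing acc with
  | nil => simp
  | cons x t ih =>
      by_cases hx : x = c
      · subst hx
        simp [pvStepA, foldA_yes, List.findIdx_cons]
      · have hx' : ([x] : List Char) ≠ [c] := by simpa using hx
        simp only [List.foldl_cons, pvStepA, hx', true_or, ne_eq, not_false_iff, if_pos,
          List.findIdx_cons]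
        rw [ih]
        simp [hx, Ne.symm hx]

-- [c] is a prefix of xs iff xs starts with c
lemma singleton_prefix_iff (c : Char) (xs : List Char) :
    ([c] <+: xs) ↔ xs.head? = some c := by
  cases xs with
  | nil => simp
  | cons y t =>
      constructor
      · rintro ⟨s, hs⟩
        simp at hs
        simp [hs.1]
      · intro h
        simp at h
        exact ⟨t, by simp [h]⟩

-- [c] is an infix of l iff c ∈ l
lemma singleton_infix_iff (c : Char) (l : List Char) : ([c] <:+: l) ↔ c ∈ l := by
  constructor
  · intro h
    exact h.subset (by simp)
  · intro h
    obtain ⟨s, t, rfl⟩ := List.append_of_mem h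
    exact ⟨s, t, by simp⟩

-- find of a single character is the first index of that character
lemma find_singleton (c : Char) (l : List Char) :
    PySem.Chars.find l [c] =
      if c ∈ l then (l.findIdx (· = c) : Int) else -1 := by
  by_cases hm : c ∈ l
  · simp only [hm, if_pos]
    have hnn : 0 ≤ PySem.Chars.find l [c] :=
      (PySem.Chars.find_nonneg_iff l [c]).2 ((singleton_infix_iff c l).2 hm)
    obtain ⟨hpre, hmin⟩ := PySem.Chars.find_spec (s := l) (sub := [c]) hnn
    set n := (PySem.Chars.find l [c]).toNat with hn
    have hgetn : l[n]? = some c := by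
      rw [← List.head?_drop]
      exact (singleton_prefix_iff c (l.drop n)).1 hpre
    have hlt : n < l.length := by
      by_contra hge
      rw [List.getElem?_eq_none (by omega)] at hgetn
      simp at hgetn
    have heq : l.findIdx (· = c) = n := by
      refine (List.findIdx_eq hlt).2 ⟨?_, ?_⟩
      · have := List.getElem?_eq_getElem hlt
        rw [this] at hgetn
        simpa using Option.some.inj hgetn
      · intro j hj
        have hne := hmin j hj
        rw [singleton_prefix_iff, List.head?_drop] at hne
        have hjl : j < l.length := by omega
        rw [List.getElem?_eq_getElem hjl] at hne
        simp only [decide_eq_false_iff_not]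
        intro hc; exact hne (by rw [hc])
    omega
  · simp only [hm, if_neg, not_false_iff]
    exact (PySem.Chars.find_eq_neg_one_iff l [c]).2
      (fun h => hm ((singleton_infix_iff c l).1 h))

-- ===== VERDICT (by name: the statement is the Claim_ definition above) =====
theorem myRemove_spec : Claim_equal_myRemove := by
  intro str ch _
  unfold Spec_myRemove myRemove myRemove_alt
  by_cases hlen : ch.toList.length = 1
  · obtain ⟨c, hc⟩ := List.length_eq_one_iff.1 hlen
    have hfind : PySem.Str.find str ch = PySem.Chars.find str.toList [c] := by
      rw [PySem.Str.find_eq, hc]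
    rw [find_singleton] at hfind
    have hlen' : ¬ (PySem.Str.len ch ≠ 1) := by
      rw [PySem.Str.len_eq, hlen]; simp
    by_cases hm : c ∈ str.toList
    · set n := str.toList.findIdx (· = c) with hn
      simp only [hm, if_pos] at hfind
      have hne1 : PySem.Str.find str ch ≠ -1 := by rw [hfind]; omega
      simp only [hc, foldA_no, hm, if_pos, hlen', List.nil_append, hne1, if_neg,
        not_false_iff]
      rw [hfind,
        PySem.List.slice_to str.toList (by omega),
        PySem.List.slice_from str.toList (by omega)]
      have h1 : ((n : Int)).toNat = n := by omega
      have h2 : ((n : Int) + 1).toNat = n + 1 := by omega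
      rw [h1, h2]
    · have hfc : PySem.Chars.find str.toList [c] = -1 := by
        rw [← hc, ← PySem.Str.find_eq, hfind, if_neg hm]
      simp [hc, foldA_no, hm, hfc]
  · have hxl : ch.length ≠ 1 := by rw [← String.length_toList]; exact hlen
    simp [foldA_ne ch.toList hlen, hxl]
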